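-- pv_equiv track=rewrite | github.com/RVMIA/dmoj | python/wantedPrime.py | numForN
-- ===== SOURCE A (Python) =====
-- def numForN(n):
--     list = []
--     for i in range(n):
--         list.append(str(i+1))
--     for i in range(n-1):
--         list.append(str(n-(i+1)))
--     o = list[0]
--     for i in range(len(list)-1):
--         o += list[i+1]
--     output = int(o)
--     return output
-- ===== SOURCE B (Python) =====
-- def numForN(n):
--     s = str(n)
--     for k in range(n - 1, 0, -1):
--         t = str(k)
--         s = t + s + t
--     return int(s)
-- ===== Notes on version B (the rewrite author's own statement) =====
-- stated objective: simpler
-- what changed: B builds the palindromic digit string in one descending loop by wrapping the accumulator on both ends (s = str(k) + s + str(k) starting from str(n)), with no list of pieces, no second arithmetic loop and no index-driven concatenation pass.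
-- outside the precondition, e.g. on numForN(0): A raises IndexError, B returns 0
import Mathlib
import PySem

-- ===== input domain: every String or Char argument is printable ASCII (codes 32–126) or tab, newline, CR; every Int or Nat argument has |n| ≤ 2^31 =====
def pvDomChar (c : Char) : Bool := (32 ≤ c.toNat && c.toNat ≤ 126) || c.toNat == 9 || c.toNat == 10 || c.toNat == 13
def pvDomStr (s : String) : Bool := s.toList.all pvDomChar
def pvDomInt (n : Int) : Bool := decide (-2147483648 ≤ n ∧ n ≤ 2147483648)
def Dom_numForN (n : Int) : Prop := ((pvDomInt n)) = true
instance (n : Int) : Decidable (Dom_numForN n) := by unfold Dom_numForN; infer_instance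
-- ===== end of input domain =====

-- B builds the palindromic digit string in ONE descending loop by wrapping the accumulator on
-- both ends (s = str(k) + s + str(k), seeded with str(n)) — no list of pieces, no second
-- arithmetic loop, no index-driven concatenation pass; same return value on every n in Pre_.

-- ===== PORT A =====
def numForN (n : Int) : Int :=
  let lst : List (List Char) :=
    (PySem.List.pyRange 0 n 1).foldl (fun l i => l ++ [PySem.Int.toChars (i + 1)]) []
  let lst :=
    (PySem.List.pyRange 0 (n - 1) 1).foldl (fun l i => l ++ [PySem.Int.toChars (n - (i + 1))]) lst
  match PySem.List.pyGet? lst 0 with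
  | none => 0   -- n ≤ 0: Python raises IndexError at list[0]; excluded by Pre_numForN
  | some o0 =>
    let o := (PySem.List.pyRange 0 (PySem.List.len lst - 1) 1).foldl
      (fun o i => o ++ PySem.List.pyGetD lst (i + 1) []) o0
    (PySem.Int.ofChars? o).getD 0   -- int(o); always a plain digit string here

-- ===== PORT B =====
def numForN_alt (n : Int) : Int :=
  let s := (PySem.List.pyRange (n - 1) 0 (-1)).foldl
    (fun s k => PySem.Int.toChars k ++ s ++ PySem.Int.toChars k) (PySem.Int.toChars n)
  (PySem.Int.ofChars? s).getD 0   -- int(s); never a ValueError under Pre_numForN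

-- ===== PRECONDITION & SPEC =====
-- Pre_ excludes exactly the inputs where A raises: n ≤ 0 (IndexError at list[0]; B returns n there).
def Pre_numForN (n : Int) : Prop := 1 ≤ n
instance (n : Int) : Decidable (Pre_numForN n) := by unfold Pre_numForN; infer_instance
def pvWitness_numForN : Int := 3

def Spec_numForN (n : Int) (out : Int) : Prop := out = numForN_alt n
instance (n : Int) (out : Int) : Decidable (Spec_numForN n out) := by unfold Spec_numForN; infer_instance

-- ===== CLAIM (what is proved, stated in full; the proofs are below) =====
def Claim_equal_numForN : Prop := ∀ (n : Int), Dom_numForN n → Pre_numForN n → Spec_numForN n (numForN n)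

-- ===== LEMMAS AND PROOFS =====

-- A's ascending piece list re-indexed: pieces str(i+1) for i in range(n) are str(i) for i in 1..n
theorem half_eq (n : Int) :
    (PySem.List.pyRange 0 n 1).map (fun i => PySem.Int.toChars (i + 1))
      = (PySem.List.pyRange 1 (n + 1) 1).map (fun i => PySem.Int.toChars i) := by
  rw [PySem.List.pyRange_one 1 (n + 1), PySem.List.pyRange_one 0 n]
  have : n + 1 - 1 = n - 0 := by ring
  rw [this]
  simp only [List.map_map]
  apply List.map_congr_left
  intro k _
  simp only [Function.comp]
  congr 1
  omega

-- A's descending piece list is the countdown range n-1 .. 1 mapped through str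
theorem desc_eq (n : Int) :
    (PySem.List.pyRange 0 (n - 1) 1).map (fun i => PySem.Int.toChars (n - (i + 1)))
      = (PySem.List.pyRange (n - 1) 0 (-1)).map (fun i => PySem.Int.toChars i) := by
  rw [PySem.List.pyRange_one 0 (n - 1), PySem.List.pyRange_neg_one (n - 1) 0]
  simp only [List.map_map]
  apply List.map_congr_left
  intro k _
  simp only [Function.comp]
  congr 1
  omega

-- A's two append-loops build exactly the two mapped piece lists
theorem lstA_eq (n : Int) :
    ((PySem.List.pyRange 0 (n - 1) 1).foldl (fun l i => l ++ [PySem.Int.toChars (n - (i + 1))])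
      ((PySem.List.pyRange 0 n 1).foldl (fun l i => l ++ [PySem.Int.toChars (i + 1)]) []))
    = (PySem.List.pyRange 0 n 1).map (fun i => PySem.Int.toChars (i + 1))
      ++ (PySem.List.pyRange 0 (n - 1) 1).map (fun i => PySem.Int.toChars (n - (i + 1))) := by
  rw [PySem.List.foldl_append_singleton_eq_map, PySem.List.foldl_append_singleton_eq_map]
  simp

-- A's index-driven concatenation loop flattens the piece list
theorem concatA_eq (x : List Char) (xs : List (List Char)) :
    (PySem.List.pyRange 0 (PySem.List.len (x :: xs) - 1) 1).foldl
      (fun o i => o ++ PySem.List.pyGetD (x :: xs) (i + 1) []) x = (x :: xs).flatten := by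
  have hshift :
      (PySem.List.pyRange 0 (PySem.List.len (x :: xs) - 1) 1).foldl
        (fun o i => o ++ PySem.List.pyGetD (x :: xs) (i + 1) []) x
      = (PySem.List.pyRange 1 ((x :: xs).length : Int) 1).foldl
        (fun o i => o ++ PySem.List.pyGetD (x :: xs) i []) x := by
    rw [PySem.List.pyRange_one 0 _, PySem.List.pyRange_one 1 _]
    rw [List.foldl_map, List.foldl_map]
    have hb : PySem.List.len (x :: xs) - 1 - 0 = ((x :: xs).length : Int) - 1 := by
      simp [PySem.List.len_eq]
    rw [hb]
    congr 1
    funext o k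
    have hidx : ((0 : Int) + (k : Int)) + 1 = 1 + (k : Int) := by omega
    rw [hidx]
  rw [hshift]
  rw [PySem.List.foldl_pyRange_pyGetD' (x :: xs) [] (fun o p => o ++ p) x (by norm_num)]
  simp [PySem.List.foldl_append_eq_flatten]

-- B's wrapping loop: folding k = m .. 1 around S yields asc-flatten ++ S ++ desc-flatten
theorem wrap_eq (m : Int) (S : List Char) :
    (PySem.List.pyRange m 0 (-1)).foldl
      (fun s k => PySem.Int.toChars k ++ s ++ PySem.Int.toChars k) S
    = ((PySem.List.pyRange 1 (m + 1) 1).map (fun i => PySem.Int.toChars i)).flatten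
      ++ S
      ++ ((PySem.List.pyRange m 0 (-1)).map (fun i => PySem.Int.toChars i)).flatten := by
  -- induction on the length m.toNat of the countdown range
  have key : ∀ (t : Nat) (m : Int) (S : List Char), m.toNat = t →
        (PySem.List.pyRange m 0 (-1)).foldl
          (fun s k => PySem.Int.toChars k ++ s ++ PySem.Int.toChars k) S
        = ((PySem.List.pyRange 1 (m + 1) 1).map (fun i => PySem.Int.toChars i)).flatten
          ++ S
          ++ ((PySem.List.pyRange m 0 (-1)).map (fun i => PySem.Int.toChars i)).flatten := by
      intro t
      induction t with
      | zero =>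
        intro m S hm0
        have hle : m ≤ 0 := by omega
        rw [PySem.List.pyRange_neg_one_eq_nil hle, PySem.List.pyRange_one_eq_nil (by omega)]
        simp
      | succ t ih =>
        intro m S hmt
        have hpos : 0 < m := by omega
        rw [PySem.List.pyRange_neg_one_cons hpos]
        simp only [List.foldl_cons, List.map_cons, List.flatten_cons]
        rw [ih (m - 1) _ (by omega)]
        have hasc : PySem.List.pyRange 1 (m + 1) 1
            = PySem.List.pyRange 1 (m - 1 + 1) 1 ++ [m] := by
          have h1 : m - 1 + 1 + 1 = m + 1 := by ring
          have := PySem.List.pyRange_one_succ_right (a := 1) (b := m) (by omega)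
          simpa using this
        rw [hasc]
        simp
  exact key m.toNat m S rfl

-- ===== VERDICT (by name: the statement is the Claim_ definition above) =====
theorem numForN_spec : Claim_equal_numForN := by
  intro n _ hpre
  unfold Spec_numForN numForN numForN_alt
  simp only
  rw [lstA_eq n]
  set asc := (PySem.List.pyRange 0 n 1).map (fun i => PySem.Int.toChars (i + 1)) with hasc
  set dsc := (PySem.List.pyRange 0 (n - 1) 1).map (fun i => PySem.Int.toChars (n - (i + 1))) with hdsc
  have hn : (1 : Int) ≤ n := hpre
  have hlenA : 0 < asc.length := by
    rw [hasc]; simp [PySem.List.length_pyRange_one]; omega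
  obtain ⟨x, xs, hx⟩ : ∃ x xs, asc ++ dsc = x :: xs := by
    cases hc : asc ++ dsc with
    | nil =>
      exfalso
      have h0 : asc = [] := (List.append_eq_nil_iff.mp hc).1
      rw [h0] at hlenA
      simp at hlenA
    | cons a t => exact ⟨a, t, rfl⟩
  rw [hx]
  have hget : PySem.List.pyGet? (x :: xs) 0 = some x := by
    simp [PySem.List.pyGet?, PySem.List.pyIdx?]
  rw [hget]
  simp only
  rw [concatA_eq x xs, ← hx]
  -- now both sides are (ofChars? _).getD 0; show the char lists agree
  have hwrap := wrap_eq (n - 1) (PySem.Int.toChars n)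
  have hstep : n - 1 + 1 = n := by ring
  rw [hstep] at hwrap
  rw [hwrap]
  congr 1
  congr 1
  rw [List.flatten_append, hasc, hdsc, half_eq n, desc_eq n]
  have hsplit : PySem.List.pyRange 1 (n + 1) 1 = PySem.List.pyRange 1 n 1 ++ [n] := by
    have := PySem.List.pyRange_one_succ_right (a := 1) (b := n) hn
    simpa using this
  rw [hsplit]
  simp only [List.map_append, List.map_cons, List.map_nil, List.flatten_append]
  simp
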